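-- pv_equiv track=rewrite | github.com/samzong/samzong | skills/repo-skill-generator/scripts/repo_skill_generator/collector.py | infer_areas_from_paths
-- ===== SOURCE A (Python) =====
-- def infer_areas_from_paths(paths: list[str]) -> list[str]:
--     areas: set[str] = set()
--     for path in paths:
--         lowered = path.lower()
--         if any(token in lowered for token in ("/docs/", "readme", ".md")):
--             areas.add("documentation")
--         if any(token in lowered for token in ("/test", "/tests", "_test.", ".spec.", ".test.")):
--             areas.add("testing")
--         if any(token in lowered for token in ("config", ".yaml", ".yml", ".toml", ".json")):
--             areas.add("configuration")
--         if any(token in lowered for token in ("api", "router", "server", "handler", "endpoint")):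
--             areas.add("api")
--     return sorted(areas)
-- ===== SOURCE B (Python) =====
-- AREA_TOKENS = [
--     ("api", ("api", "router", "server", "handler", "endpoint")),
--     ("configuration", ("config", ".yaml", ".yml", ".toml", ".json")),
--     ("documentation", ("/docs/", "readme", ".md")),
--     ("testing", ("/test", "/tests", "_test.", ".spec.", ".test.")),
-- ]
--
--
-- def infer_areas_from_paths(paths: list[str]) -> list[str]:
--     lowered = [p.lower() for p in paths]
--     return [area for area, tokens in AREA_TOKENS
--             if any(token in path for path in lowered for token in tokens)]
-- ===== Notes on version B (the rewrite author's own statement) =====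
-- stated objective: idiomatic
-- what changed: Replaces the per-path loop with four hard-coded branch/set updates by a data-driven scan over an AREA_TOKENS table in sorted area order, emitting matching areas directly into the already-sorted output list (no set, no final sort).
import Mathlib
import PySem

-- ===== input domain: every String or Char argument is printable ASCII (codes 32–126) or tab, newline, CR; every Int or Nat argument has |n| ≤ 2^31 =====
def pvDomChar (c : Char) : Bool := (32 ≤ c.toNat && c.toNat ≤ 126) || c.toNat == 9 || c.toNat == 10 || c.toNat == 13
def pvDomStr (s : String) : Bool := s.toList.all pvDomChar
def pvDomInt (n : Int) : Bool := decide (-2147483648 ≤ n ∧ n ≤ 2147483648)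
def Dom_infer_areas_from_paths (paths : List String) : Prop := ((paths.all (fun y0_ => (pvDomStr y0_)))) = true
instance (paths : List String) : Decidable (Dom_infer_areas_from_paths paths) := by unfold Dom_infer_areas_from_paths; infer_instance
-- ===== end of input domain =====

-- B replaces A's per-path loop over four hard-coded branches by a data-driven scan over an
-- area→tokens table in sorted area order, emitting the already-sorted result directly (no set, no sort).


-- ===== PORT A =====
-- loop body of A's 'for path in paths'
def aStep (areas : PySem.Set String) (path : String) : PySem.Set String :=
  let lowered := PySem.Str.lower path
  let areas := if ["/docs/", "readme", ".md"].any (fun t => PySem.Str.isIn t lowered) then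
      PySem.Set.add areas "documentation" else areas
  let areas := if ["/test", "/tests", "_test.", ".spec.", ".test."].any (fun t => PySem.Str.isIn t lowered) then
      PySem.Set.add areas "testing" else areas
  let areas := if ["config", ".yaml", ".yml", ".toml", ".json"].any (fun t => PySem.Str.isIn t lowered) then
      PySem.Set.add areas "configuration" else areas
  if ["api", "router", "server", "handler", "endpoint"].any (fun t => PySem.Str.isIn t lowered) then
      PySem.Set.add areas "api" else areas

def infer_areas_from_paths (paths : List String) : List String :=
  PySem.List.sorted (paths.foldl aStep PySem.Set.empty) (fun x => x) false

-- ===== PORT B =====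
def areaTokens : List (String × List String) :=
  [("api", ["api", "router", "server", "handler", "endpoint"]),
   ("configuration", ["config", ".yaml", ".yml", ".toml", ".json"]),
   ("documentation", ["/docs/", "readme", ".md"]),
   ("testing", ["/test", "/tests", "_test.", ".spec.", ".test."])]

def infer_areas_from_paths_alt (paths : List String) : List String :=
  let lowered := paths.map PySem.Str.lower
  (areaTokens.filter (fun a => lowered.any (fun p => a.2.any (fun t => PySem.Str.isIn t p)))).map Prod.fst

-- ===== PRECONDITION & SPEC =====
def Spec_infer_areas_from_paths (paths : List String) (out : List String) : Prop := out = infer_areas_from_paths_alt paths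
instance (paths : List String) (out : List String) : Decidable (Spec_infer_areas_from_paths paths out) := by unfold Spec_infer_areas_from_paths; infer_instance

-- ===== CLAIM (what is proved, stated in full; the proofs are below) =====
def Claim_equal_infer_areas_from_paths : Prop := ∀ (paths : List String), Dom_infer_areas_from_paths paths → Spec_infer_areas_from_paths paths (infer_areas_from_paths paths)

-- ===== LEMMAS AND PROOFS =====

-- "some token of toks occurs in path.lower()"
def hitTok (toks : List String) (p : String) : Bool :=
  toks.any (fun t => PySem.Str.isIn t (PySem.Str.lower p))

lemma mem_addIf (s : PySem.Set String) (y x : String) (c : Bool) :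
    (x ∈ (if c then PySem.Set.add s y else s)) ↔ x ∈ s ∨ (x = y ∧ c = true) := by
  cases c <;> simp [PySem.Set.mem_add]

lemma mem_aStep (s : PySem.Set String) (p : String) (x : String) :
    x ∈ aStep s p ↔ x ∈ s
      ∨ (x = "documentation" ∧ hitTok ["/docs/", "readme", ".md"] p = true)
      ∨ (x = "testing" ∧ hitTok ["/test", "/tests", "_test.", ".spec.", ".test."] p = true)
      ∨ (x = "configuration" ∧ hitTok ["config", ".yaml", ".yml", ".toml", ".json"] p = true)
      ∨ (x = "api" ∧ hitTok ["api", "router", "server", "handler", "endpoint"] p = true) := by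
  unfold aStep hitTok
  dsimp only
  simp only [mem_addIf, or_assoc]

lemma nodup_aStep (s : PySem.Set String) (p : String) (h : s.Nodup) : (aStep s p).Nodup := by
  unfold aStep
  dsimp only
  split_ifs <;> (repeat' apply PySem.Set.nodup_add) <;> exact h

lemma nodup_foldA (paths : List String) (s : PySem.Set String) (h : s.Nodup) :
    (paths.foldl aStep s).Nodup := by
  induction paths generalizing s with
  | nil => exact h
  | cons p rest ih => exact ih _ (nodup_aStep s p h)

lemma orShuffle (S Dp Tp Cp Ap Dr Tr Cr Ar : Prop) :
    ((S ∨ Dp ∨ Tp ∨ Cp ∨ Ap) ∨ Dr ∨ Tr ∨ Cr ∨ Ar) ↔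
      (S ∨ (Dp ∨ Dr) ∨ (Tp ∨ Tr) ∨ (Cp ∨ Cr) ∨ (Ap ∨ Ar)) := by tauto

lemma mem_foldA (paths : List String) (s : PySem.Set String) (x : String) :
    x ∈ paths.foldl aStep s ↔ x ∈ s
      ∨ (x = "documentation" ∧ paths.any (hitTok ["/docs/", "readme", ".md"]) = true)
      ∨ (x = "testing" ∧ paths.any (hitTok ["/test", "/tests", "_test.", ".spec.", ".test."]) = true)
      ∨ (x = "configuration" ∧ paths.any (hitTok ["config", ".yaml", ".yml", ".toml", ".json"]) = true)
      ∨ (x = "api" ∧ paths.any (hitTok ["api", "router", "server", "handler", "endpoint"]) = true) := by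
  induction paths generalizing s with
  | nil => simp
  | cons p rest ih =>
    simp only [List.foldl_cons, ih, mem_aStep, List.any_cons, Bool.or_eq_true, and_or_left]
    exact orShuffle _ _ _ _ _ _ _ _ _

lemma map_fst_filter_areaTokens (c : String × List String → Bool) :
    (areaTokens.filter c).map Prod.fst =
      (if c ("api", ["api", "router", "server", "handler", "endpoint"]) then ["api"] else [])
      ++ (if c ("configuration", ["config", ".yaml", ".yml", ".toml", ".json"]) then ["configuration"] else [])
      ++ (if c ("documentation", ["/docs/", "readme", ".md"]) then ["documentation"] else [])
      ++ (if c ("testing", ["/test", "/tests", "_test.", ".spec.", ".test."]) then ["testing"] else []) := by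
  unfold areaTokens
  simp only [List.filter_cons, List.filter_nil]
  split_ifs <;> simp_all

lemma cond_eq (toks : List String) (paths : List String) :
    ((paths.map PySem.Str.lower).any (fun p => toks.any (fun t => PySem.Str.isIn t p)))
      = paths.any (hitTok toks) := by
  rw [List.any_map]; rfl

lemma alt_eq (paths : List String) :
    infer_areas_from_paths_alt paths =
      (if paths.any (hitTok ["api", "router", "server", "handler", "endpoint"]) then ["api"] else [])
      ++ (if paths.any (hitTok ["config", ".yaml", ".yml", ".toml", ".json"]) then ["configuration"] else [])
      ++ (if paths.any (hitTok ["/docs/", "readme", ".md"]) then ["documentation"] else [])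
      ++ (if paths.any (hitTok ["/test", "/tests", "_test.", ".spec.", ".test."]) then ["testing"] else []) := by
  unfold infer_areas_from_paths_alt
  dsimp only
  rw [map_fst_filter_areaTokens]
  simp only [cond_eq]

-- ===== VERDICT (by name: the statement is the Claim_ definition above) =====
set_option maxHeartbeats 1000000 in
theorem infer_areas_from_paths_spec : Claim_equal_infer_areas_from_paths := by
  intro paths _
  show infer_areas_from_paths paths = infer_areas_from_paths_alt paths
  unfold infer_areas_from_paths
  rw [alt_eq]
  apply PySem.List.sorted_eq_of_perm_of_pairwise_lt
  · have hn2 : (paths.foldl aStep PySem.Set.empty).Nodup :=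
      nodup_foldA paths _ (by simp [PySem.Set.empty])
    have hn1 : ((if paths.any (hitTok ["api", "router", "server", "handler", "endpoint"]) then ["api"] else [])
      ++ (if paths.any (hitTok ["config", ".yaml", ".yml", ".toml", ".json"]) then ["configuration"] else [])
      ++ (if paths.any (hitTok ["/docs/", "readme", ".md"]) then ["documentation"] else [])
      ++ (if paths.any (hitTok ["/test", "/tests", "_test.", ".spec.", ".test."]) then ["testing"] else [])).Nodup := by
      cases hA : paths.any (hitTok ["api", "router", "server", "handler", "endpoint"]) <;>
      cases hC : paths.any (hitTok ["config", ".yaml", ".yml", ".toml", ".json"]) <;>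
      cases hD : paths.any (hitTok ["/docs/", "readme", ".md"]) <;>
      cases hT : paths.any (hitTok ["/test", "/tests", "_test.", ".spec.", ".test."]) <;> decide
    rw [List.perm_ext_iff_of_nodup hn1 hn2]
    intro x
    rw [mem_foldA]
    cases hA : paths.any (hitTok ["api", "router", "server", "handler", "endpoint"]) <;>
    cases hC : paths.any (hitTok ["config", ".yaml", ".yml", ".toml", ".json"]) <;>
    cases hD : paths.any (hitTok ["/docs/", "readme", ".md"]) <;>
    cases hT : paths.any (hitTok ["/test", "/tests", "_test.", ".spec.", ".test."]) <;>
      simp [PySem.Set.empty] <;> tauto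
  · cases hA : paths.any (hitTok ["api", "router", "server", "handler", "endpoint"]) <;>
    cases hC : paths.any (hitTok ["config", ".yaml", ".yml", ".toml", ".json"]) <;>
    cases hD : paths.any (hitTok ["/docs/", "readme", ".md"]) <;>
    cases hT : paths.any (hitTok ["/test", "/tests", "_test.", ".spec.", ".test."]) <;> simp <;> decide
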